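-- pv_equiv track=rewrite | github.com/hassanarshad123/nigehbaan | backend/app/tasks/processing_tasks.py | _classify_court_incident
-- ===== SOURCE A (Python) =====
-- def _classify_court_incident(ppc_sections: list[str] | None) -> str:
--     """Classify incident type based on PPC sections."""
--     if not ppc_sections:
--         return "trafficking"
--
--     sections = set(s.replace("-", "").upper() for s in ppc_sections)
--
--     if any(s in sections for s in ("364A", "364", "365")):
--         return "kidnapping"
--     if any(s in sections for s in ("370", "371", "371A", "371B")):
--         return "trafficking"
--     if any(s in sections for s in ("377",)):
--         return "sexual_abuse"
--     if any(s in sections for s in ("374",)):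
--         return "forced_labor"
--     return "trafficking"
-- ===== SOURCE B (Python) =====
-- _PRIO = {"364A": 0, "364": 0, "365": 0,
--          "370": 1, "371": 1, "371A": 1, "371B": 1,
--          "377": 2, "374": 3}
-- _CATS = ("kidnapping", "trafficking", "sexual_abuse", "forced_labor", "trafficking")
--
--
-- def _classify_court_incident(ppc_sections):
--     """Classify incident type based on PPC sections (one pass, min priority)."""
--     if ppc_sections is None:
--         return "trafficking"
--     best = 4
--     for code in ppc_sections:
--         p = _PRIO.get(code.replace("-", "").upper(), 4)
--         if p < best:
--             best = p
--     return _CATS[best]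
-- ===== Notes on version B (the rewrite author's own statement) =====
-- stated objective: alternative
-- what changed: Replaces A's normalized-code set plus four sequential group-membership chains with a single table-driven pass that looks each normalized code up in one code-to-priority dict, keeps the minimum priority seen, and maps that priority to the category (trafficking for empty/None/no match).
import Mathlib
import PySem

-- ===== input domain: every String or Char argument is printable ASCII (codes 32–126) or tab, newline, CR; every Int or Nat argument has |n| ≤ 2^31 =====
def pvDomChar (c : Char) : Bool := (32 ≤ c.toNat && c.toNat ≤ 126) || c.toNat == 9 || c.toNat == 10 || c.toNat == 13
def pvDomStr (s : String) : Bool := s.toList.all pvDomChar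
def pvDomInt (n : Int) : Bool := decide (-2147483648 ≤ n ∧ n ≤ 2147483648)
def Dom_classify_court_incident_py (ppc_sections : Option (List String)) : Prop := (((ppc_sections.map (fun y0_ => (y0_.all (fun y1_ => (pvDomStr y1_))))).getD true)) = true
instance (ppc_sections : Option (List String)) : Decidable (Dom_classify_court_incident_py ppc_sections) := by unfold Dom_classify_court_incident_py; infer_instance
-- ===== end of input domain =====

-- B replaces A's set + four group-membership chains by a single pass keeping the minimum priority from one code→priority table (alternative, table-driven; same cost).

-- shared normalization: s.replace("-", "").upper()
def pvNorm (s : String) : String := PySem.Str.upper (PySem.Str.replace s "-" "")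

-- ===== PORT A =====
def classify_court_incident_py (ppc_sections : Option (List String)) : String :=
  match ppc_sections with
  | none => "trafficking"          -- `not ppc_sections` is true for None
  | some xs =>
    if xs = [] then "trafficking"  -- … and for the empty list
    else
      let sections : PySem.Set String := PySem.Set.ofList (xs.map pvNorm)
      if ["364A", "364", "365"].any (fun s => PySem.Set.contains sections s) then "kidnapping"
      else if ["370", "371", "371A", "371B"].any (fun s => PySem.Set.contains sections s) then "trafficking"
      else if ["377"].any (fun s => PySem.Set.contains sections s) then "sexual_abuse"
      else if ["374"].any (fun s => PySem.Set.contains sections s) then "forced_labor"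
      else "trafficking"

-- ===== PORT B =====
def pvPrio : PySem.Dict String Int :=
  PySem.Dict.mk [("364A", 0), ("364", 0), ("365", 0),
                 ("370", 1), ("371", 1), ("371A", 1), ("371B", 1),
                 ("377", 2), ("374", 3)]

def pvCats : List String := ["kidnapping", "trafficking", "sexual_abuse", "forced_labor", "trafficking"]

def classify_court_incident_py_alt (ppc_sections : Option (List String)) : String :=
  match ppc_sections with
  | none => "trafficking"
  | some xs =>
    let best : Int := xs.foldl (fun b code =>
      let p := PySem.Dict.getD pvPrio (pvNorm code) 4
      if p < b then p else b) 4
    -- _CATS[best]: exact — 0 ≤ best ≤ 4 always, so the tuple index never raises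
    (PySem.List.pyGet? pvCats best).getD ""

-- ===== PRECONDITION & SPEC =====
def Spec_classify_court_incident_py (ppc_sections : Option (List String)) (out : String) : Prop := out = classify_court_incident_py_alt ppc_sections
instance (ppc_sections : Option (List String)) (out : String) : Decidable (Spec_classify_court_incident_py ppc_sections out) := by unfold Spec_classify_court_incident_py; infer_instance

-- ===== CLAIM (what is proved, stated in full; the proofs are below) =====
def Claim_equal_classify_court_incident_py : Prop := ∀ (ppc_sections : Option (List String)), Dom_classify_court_incident_py ppc_sections → Spec_classify_court_incident_py ppc_sections (classify_court_incident_py ppc_sections)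

-- ===== LEMMAS AND PROOFS =====

-- the priority lookup as plain nested ifs on the key
theorem pvPrio_getD (s : String) :
    PySem.Dict.getD pvPrio s 4 =
      if "364A" = s then 0 else if "364" = s then 0 else if "365" = s then 0
      else if "370" = s then 1 else if "371" = s then 1 else if "371A" = s then 1 else if "371B" = s then 1
      else if "377" = s then 2 else if "374" = s then 3 else 4 := by
  simp only [pvPrio, PySem.Dict.getD_eq_get?_getD, PySem.Dict.get?_mk_cons, beq_iff_eq]
  split_ifs <;> rfl

def pvQ (c : String) : Int := PySem.Dict.getD pvPrio (pvNorm c) 4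

theorem pvQ_cases (c : String) : pvQ c = 0 ∨ pvQ c = 1 ∨ pvQ c = 2 ∨ pvQ c = 3 ∨ pvQ c = 4 := by
  unfold pvQ; rw [pvPrio_getD]; split_ifs <;> simp

-- the minimal priority occurring in xs (4 when none occurs)
def pvFm (xs : List String) : Int :=
  if xs.any (fun c => pvQ c == 0) then 0
  else if xs.any (fun c => pvQ c == 1) then 1
  else if xs.any (fun c => pvQ c == 2) then 2
  else if xs.any (fun c => pvQ c == 3) then 3
  else 4

theorem pvFm_bounds (xs : List String) : 0 ≤ pvFm xs ∧ pvFm xs ≤ 4 := by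
  unfold pvFm; split_ifs <;> omega

theorem pvQ_eq_iff (c : String) :
    (pvQ c = 0 ↔ pvNorm c ∈ ["364A", "364", "365"])
    ∧ (pvQ c = 1 ↔ pvNorm c ∈ ["370", "371", "371A", "371B"])
    ∧ (pvQ c = 2 ↔ pvNorm c ∈ ["377"])
    ∧ (pvQ c = 3 ↔ pvNorm c ∈ ["374"]) := by
  unfold pvQ; rw [pvPrio_getD]
  split_ifs <;> simp_all [eq_comm] <;> (rename_i h; rw [← h]; decide)

theorem pvFm_cons (c : String) (xs : List String) :
    pvFm (c :: xs) = min (pvQ c) (pvFm xs) := by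
  have hb := pvFm_bounds xs
  rcases pvQ_cases c with h | h | h | h | h <;>
    · revert hb
      simp [pvFm, List.any_cons, h, Int.min_def]
      try split_ifs <;> omega

theorem pvFold_eq_min (xs : List String) (b : Int) (hb : b ≤ 4) :
    xs.foldl (fun b code =>
      if PySem.Dict.getD pvPrio (pvNorm code) 4 < b then PySem.Dict.getD pvPrio (pvNorm code) 4 else b) b
      = min b (pvFm xs) := by
  induction xs generalizing b with
  | nil =>
    have : pvFm [] = 4 := by unfold pvFm; simp
    simp [this, Int.min_def]
    omega
  | cons c xs ih =>
    have hq := pvQ_cases c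
    rw [List.foldl_cons]
    have hstep : (if PySem.Dict.getD pvPrio (pvNorm c) 4 < b then PySem.Dict.getD pvPrio (pvNorm c) 4 else b)
        = if pvQ c < b then pvQ c else b := rfl
    have hb' : (if pvQ c < b then pvQ c else b) ≤ 4 := by
      rcases hq with h | h | h | h | h <;> split_ifs <;> omega
    rw [hstep, ih _ hb', pvFm_cons]
    have hf := pvFm_bounds xs
    simp only [Int.min_def]
    split_ifs <;> omega

theorem classify_court_incident_py_eq_alt (ppc_sections : Option (List String)) :
    classify_court_incident_py ppc_sections = classify_court_incident_py_alt ppc_sections := by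
  cases ppc_sections with
  | none => rfl
  | some xs =>
    by_cases he : xs = []
    · subst he; rfl
    simp only [classify_court_incident_py, classify_court_incident_py_alt, if_neg he]
    rw [pvFold_eq_min xs 4 (by omega)]
    have hf := pvFm_bounds xs
    have hmin : min (4 : Int) (pvFm xs) = pvFm xs := by omega
    rw [hmin]
    -- A's membership tests expressed through pvQ
    have hmem : ∀ s : String, PySem.Set.contains (PySem.Set.ofList (xs.map pvNorm)) s
        = xs.any (fun c => pvNorm c == s) := by
      intro s
      rw [Bool.eq_iff_iff]
      simp [PySem.Set.contains, PySem.Set.mem_ofList, List.mem_map, List.any_eq_true]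
    have hany : ∀ (k : Int) (L : List String),
        (∀ c : String, pvQ c = k ↔ pvNorm c ∈ L) →
        (xs.any (fun c => pvQ c == k)) = L.any (fun s => PySem.Set.contains (PySem.Set.ofList (xs.map pvNorm)) s) := by
      intro k L hL
      rw [Bool.eq_iff_iff]
      simp only [hmem, List.any_eq_true, beq_iff_eq]
      constructor
      · rintro ⟨c, hc, hq⟩
        exact ⟨pvNorm c, (hL c).1 hq, c, hc, rfl⟩
      · rintro ⟨s, hs, c, hc, hn⟩
        exact ⟨c, hc, (hL c).2 (hn ▸ hs)⟩
    have h0 := hany 0 ["364A", "364", "365"] (fun c => (pvQ_eq_iff c).1)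
    have h1 := hany 1 ["370", "371", "371A", "371B"] (fun c => (pvQ_eq_iff c).2.1)
    have h2 := hany 2 ["377"] (fun c => (pvQ_eq_iff c).2.2.1)
    have h3 := hany 3 ["374"] (fun c => (pvQ_eq_iff c).2.2.2)
    unfold pvFm
    rw [h0, h1, h2, h3]
    split_ifs <;> rfl

-- ===== VERDICT (by name: the statement is the Claim_ definition above) =====
theorem classify_court_incident_py_spec : Claim_equal_classify_court_incident_py := by
  intro xs _
  exact classify_court_incident_py_eq_alt xs
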